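-- pv_equiv track=rewrite | github.com/pypi-data/pypi-mirror-60 | packages/SPerATo/SPerATo-0.9.2.tar.gz/SPerATo-0.9.2/sperato/aux_slurm.py | gen_group_monthly_data
-- ===== SOURCE A (Python) =====
-- def gen_group_monthly_data(data):
--     final = {}
--     for element in data:
--         (month, *rest) = element
--         if month in final.keys():
--             for i, _ in enumerate(rest):
--                 final[month][i] += _
--         else:
--             final[month] = list(rest)
--     sorted_data = [(month, values) for (month, values) in final.items()]
--     sorted_data.sort()
--     for month, values in sorted_data:
--         yield (month,) +tuple(values)
-- ===== SOURCE B (Python) =====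
-- def gen_group_monthly_data(data):
--     # Sort once by month (stable), then one linear scan over the already-grouped
--     # rows with a running (month, sum) accumulator; output is already in order.
--     rows = sorted(data, key=lambda e: e[0])
--     out = []
--     cur_month = None
--     cur_sum = 0
--     for month, value in rows:
--         if month == cur_month:
--             cur_sum += value
--         else:
--             if cur_month is not None:
--                 out.append((cur_month, cur_sum))
--             cur_month = month
--             cur_sum = value
--     if cur_month is not None:
--         out.append((cur_month, cur_sum))
--     yield from out
-- ===== Notes on version B (the rewrite author's own statement) =====
-- stated objective: alternative
-- what changed: Replaces A's dict aggregation followed by a final sort of the items with a single stable sort of the rows by month and one linear scan that sums consecutive equal-month rows with a running accumulator, emitting groups already in order.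
import Mathlib
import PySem

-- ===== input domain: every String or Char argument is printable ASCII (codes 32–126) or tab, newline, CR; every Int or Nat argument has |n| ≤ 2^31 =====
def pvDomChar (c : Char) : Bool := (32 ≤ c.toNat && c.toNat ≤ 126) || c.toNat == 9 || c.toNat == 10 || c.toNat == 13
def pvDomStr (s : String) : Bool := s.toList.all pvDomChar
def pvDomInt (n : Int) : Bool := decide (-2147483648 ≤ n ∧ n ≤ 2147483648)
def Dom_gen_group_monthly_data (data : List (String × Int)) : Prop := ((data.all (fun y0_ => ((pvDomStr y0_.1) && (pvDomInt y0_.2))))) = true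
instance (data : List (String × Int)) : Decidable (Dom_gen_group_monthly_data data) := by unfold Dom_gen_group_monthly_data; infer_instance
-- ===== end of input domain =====

-- B replaces A's dict aggregation + final sort of the items by one stable sort of the
-- rows by month and a single linear scan summing consecutive equal-month rows
-- (alternative decomposition, similar cost).


-- ===== PORT A =====
-- dict final : month -> running sum (each row's rest is the single Int, so
-- 'final[month][i] += _' is one addition on that entry); then the items are
-- sorted (tuple sort = by month first, then value) and yielded.
def gen_group_monthly_data (data : List (String × Int)) : List (String × Int) :=
  let final : PySem.Dict String Int :=
    data.foldl (fun final element =>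
      if final.contains element.1 then final.modify element.1 0 (· + element.2)
      else final.insert element.1 element.2) PySem.Dict.empty
  let sorted_data := PySem.List.sorted2 final.items (fun p => p.1) (fun p => p.2) false
  sorted_data

-- ===== PORT B =====
-- state = (out, cur_month : Option String, cur_sum); one fold over the sorted rows.
def pvStepB (st : List (String × Int) × Option String × Int) (e : String × Int) :
    List (String × Int) × Option String × Int :=
  match st with
  | (out, some m, s) =>
      if e.1 == m then (out, some m, s + e.2)
      else (out ++ [(m, s)], some e.1, e.2)
  | (out, none, _) => (out, some e.1, e.2)

def gen_group_monthly_data_alt (data : List (String × Int)) : List (String × Int) :=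
  let rows := PySem.List.sorted data (fun e => e.1) false
  match rows.foldl pvStepB ([], none, 0) with
  | (out, some m, s) => out ++ [(m, s)]
  | (out, none, _) => out

-- ===== PRECONDITION & SPEC =====
def Spec_gen_group_monthly_data (data : List (String × Int)) (out : List (String × Int)) : Prop := out = gen_group_monthly_data_alt data
instance (data : List (String × Int)) (out : List (String × Int)) : Decidable (Spec_gen_group_monthly_data data out) := by unfold Spec_gen_group_monthly_data; infer_instance

-- ===== CLAIM (what is proved, stated in full; the proofs are below) =====
def Claim_equal_gen_group_monthly_data : Prop := ∀ (data : List (String × Int)), Dom_gen_group_monthly_data data → Spec_gen_group_monthly_data data (gen_group_monthly_data data)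

-- ===== LEMMAS AND PROOFS =====

-- total of the values of all rows with month k
def pvTot (k : String) (l : List (String × Int)) : Int :=
  (l.map (fun e => if e.1 = k then e.2 else 0)).sum

-- the grouped output B produces from the tail of the sorted rows, given the
-- current accumulator (m, s)
def pvAux (m : String) (s : Int) : List (String × Int) → List (String × Int)
  | [] => [(m, s)]
  | e :: t => if e.1 = m then pvAux m (s + e.2) t else (m, s) :: pvAux e.1 e.2 t

def pvFinish (st : List (String × Int) × Option String × Int) : List (String × Int) :=
  match st with
  | (out, some m, s) => out ++ [(m, s)]
  | (out, none, _) => out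

-- the canonical aggregate: first-occurrence-distinct months with their totals
def pvL (data : List (String × Int)) : List (String × Int) :=
  (PySem.Set.ofList (data.map Prod.fst)).map (fun k => (k, pvTot k data))

theorem pvTot_cons (k : String) (e : String × Int) (l : List (String × Int)) :
    pvTot k (e :: l) = (if e.1 = k then e.2 else 0) + pvTot k l := by
  simp [pvTot]

theorem pvTot_eq_zero {k : String} {l : List (String × Int)}
    (h : ∀ e ∈ l, e.1 ≠ k) : pvTot k l = 0 := by
  induction l with
  | nil => rfl
  | cons e t ih =>
      rw [pvTot_cons, if_neg (h e (by simp)), ih (fun e' he' => h e' (by simp [he']))]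
      ring

theorem pvTot_perm (k : String) {l l' : List (String × Int)} (h : l.Perm l') :
    pvTot k l = pvTot k l' := by
  exact List.Perm.sum_eq (h.map _)

theorem pvFinish_foldl (t : List (String × Int)) :
    ∀ (out : List (String × Int)) (m : String) (s : Int),
      pvFinish (t.foldl pvStepB (out, some m, s)) = out ++ pvAux m s t := by
  induction t with
  | nil => intro out m s; rfl
  | cons e t ih =>
      intro out m s
      by_cases h : e.1 = m
      · simp [pvStepB, h, pvAux, ih]
      · simp [pvStepB, h, pvAux, ih]

theorem pvAux_mem_fst (k : String) : ∀ (t : List (String × Int)) (m : String) (s : Int),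
    k ∈ (pvAux m s t).map Prod.fst ↔ k = m ∨ k ∈ t.map Prod.fst := by
  intro t
  induction t with
  | nil => intro m s; simp [pvAux]
  | cons e t ih =>
      intro m s
      by_cases h : e.1 = m
      · simp [pvAux, h, ih]
      · simp [pvAux, h, ih]

theorem pvAux_pairwise : ∀ (t : List (String × Int)) (m : String) (s : Int),
    (∀ e ∈ t, m ≤ e.1) → t.Pairwise (fun a b => a.1 ≤ b.1) →
    (pvAux m s t).Pairwise (fun a b => a.1 < b.1) := by
  intro t
  induction t with
  | nil => intro m s _ _; simp [pvAux]
  | cons e t ih =>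
      intro m s hle hp
      rw [List.pairwise_cons] at hp
      by_cases h : e.1 = m
      · simpa [pvAux, h] using ih m (s + e.2)
          (fun e' he' => le_trans (h ▸ hle e (by simp)) (hp.1 e' he')) hp.2
      · have hm : m < e.1 := lt_of_le_of_ne (hle e (by simp)) (fun hc => h hc.symm)
        simp only [pvAux, if_neg h, List.pairwise_cons]
        constructor
        · intro b hb
          have : b.1 = e.1 ∨ b.1 ∈ t.map Prod.fst := by
            simpa using (pvAux_mem_fst b.1 t e.1 e.2).mp (List.mem_map_of_mem hb)
          rcases this with hb1 | hb1
          · exact hb1 ▸ hm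
          · rcases List.mem_map.mp hb1 with ⟨e', he', he1⟩
            exact lt_of_lt_of_le hm (he1 ▸ hp.1 e' he')
        · exact ih e.1 e.2 hp.1 hp.2

theorem pvAux_val : ∀ (t : List (String × Int)) (m : String) (s : Int),
    (∀ e ∈ t, m ≤ e.1) → t.Pairwise (fun a b => a.1 ≤ b.1) →
    ∀ p ∈ pvAux m s t, p.2 = pvTot p.1 ((m, s) :: t) := by
  intro t
  induction t with
  | nil =>
      intro m s _ _ p hp
      simp only [pvAux, List.mem_singleton] at hp
      subst hp; simp [pvTot]
  | cons e t ih =>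
      intro m s hle hp p hmem
      rw [List.pairwise_cons] at hp
      by_cases h : e.1 = m
      · rw [pvAux, if_pos h] at hmem
        have := ih m (s + e.2)
          (fun e' he' => le_trans (h ▸ hle e (by simp)) (hp.1 e' he')) hp.2 p hmem
        rw [this, pvTot_cons, pvTot_cons, pvTot_cons, h]
        by_cases hk : m = p.1 <;> simp [hk] <;> ring
      · have hm : m < e.1 := lt_of_le_of_ne (hle e (by simp)) (fun hc => h hc.symm)
        rw [pvAux, if_neg h] at hmem
        rcases List.mem_cons.mp hmem with hpe | hpt
        · subst hpe
          have hz : pvTot m (e :: t) = 0 := by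
            apply pvTot_eq_zero
            intro e' he'
            rcases List.mem_cons.mp he' with rfl | he'
            · exact fun hc => h hc
            · exact ne_of_gt (lt_of_lt_of_le hm (hp.1 e' he'))
          simp [pvTot_cons, hz]
        · have hne : p.1 ≠ m := by
            have : p.1 = e.1 ∨ p.1 ∈ t.map Prod.fst := by
              simpa using (pvAux_mem_fst p.1 t e.1 e.2).mp (List.mem_map_of_mem hpt)
            rcases this with h1 | h1
            · exact h1 ▸ ne_of_gt hm
            · rcases List.mem_map.mp h1 with ⟨e', he', he1⟩
              exact ne_of_gt (lt_of_lt_of_le hm (he1 ▸ hp.1 e' he'))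
          have := ih e.1 e.2 hp.1 hp.2 p hpt
          rw [this, pvTot_cons, pvTot_cons, if_neg (fun hc : m = p.1 => hne hc.symm)]
          rw [zero_add]
          exact (pvTot_cons p.1 e t).symm


-- B output is the canonical aggregate, sorted by month
theorem alt_eq_sorted_pvL (data : List (String × Int)) :
    gen_group_monthly_data_alt data = PySem.List.sorted (pvL data) (fun p => p.1) false := by
  have halt : gen_group_monthly_data_alt data
      = pvFinish ((PySem.List.sorted data (fun e => e.1) false).foldl pvStepB ([], none, 0)) := rfl
  cases hrows : PySem.List.sorted data (fun e => e.1) false with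
  | nil =>
      have hdata : data = [] := (PySem.List.sorted_eq_nil_iff _ _ _).mp hrows
      subst hdata
      rfl
  | cons e t =>
      have hperm : (e :: t).Perm data := hrows ▸ PySem.List.sorted_perm data (fun e => e.1) false
      have hsp : (e :: t).Pairwise (fun a b : String × Int => a.1 ≤ b.1) :=
        hrows ▸ PySem.List.sorted_pairwise data (fun e => e.1)
      rw [List.pairwise_cons] at hsp
      have haux : gen_group_monthly_data_alt data = pvAux e.1 e.2 t := by
        rw [halt, hrows]
        show pvFinish (t.foldl pvStepB ([], some e.1, e.2)) = _
        rw [pvFinish_foldl]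
        rfl
      rw [haux]
      apply (PySem.List.sorted_eq_of_perm_of_pairwise_lt _ _ _ _ _).symm
      · -- perm
        apply (List.perm_ext_iff_of_nodup ?_ ?_).mpr
        · intro p
          constructor
          · intro hp
            have h1 : p.1 = e.1 ∨ p.1 ∈ t.map Prod.fst :=
              (pvAux_mem_fst p.1 t e.1 e.2).mp (List.mem_map_of_mem hp)
            have hk : p.1 ∈ data.map Prod.fst := by
              apply (hperm.map Prod.fst).mem_iff.mp
              simpa using h1
            have hv : p.2 = pvTot p.1 data := by
              rw [pvAux_val t e.1 e.2 hsp.1 hsp.2 p hp]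
              exact pvTot_perm p.1 (by simpa using hperm)
            simp only [pvL, List.mem_map]
            exact ⟨p.1, (PySem.Set.mem_ofList _ _).mpr hk, by rw [← hv]⟩
          · intro hp
            rcases List.mem_map.mp hp with ⟨k, hk, rfl⟩
            have hk' : k ∈ data.map Prod.fst := (PySem.Set.mem_ofList _ _).mp hk
            have hk2 : k = e.1 ∨ k ∈ t.map Prod.fst := by
              have := (hperm.map Prod.fst).mem_iff.mpr hk'
              simpa using this
            have : k ∈ (pvAux e.1 e.2 t).map Prod.fst := (pvAux_mem_fst k t e.1 e.2).mpr hk2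
            rcases List.mem_map.mp this with ⟨q, hq, rfl⟩
            have hv : q.2 = pvTot q.1 data := by
              rw [pvAux_val t e.1 e.2 hsp.1 hsp.2 q hq]
              exact pvTot_perm q.1 (by simpa using hperm)
            have : q = (q.1, pvTot q.1 data) := by
              cases q; simp at hv ⊢; exact hv
            rwa [← this]
        · exact (pvAux_pairwise t e.1 e.2 hsp.1 hsp.2).imp (fun h => by
            intro hc; subst hc; exact lt_irrefl _ h)
        · exact ((PySem.Set.nodup_ofList _).map (fun k1 k2 h => (Prod.mk.injEq _ _ _ _).mp h |>.1))
      · exact pvAux_pairwise t e.1 e.2 hsp.1 hsp.2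

-- A's dict fold step is exactly a modify
theorem stepA_eq_modify (d : PySem.Dict String Int) (e : String × Int) :
    (if d.contains e.1 then d.modify e.1 0 (· + e.2) else d.insert e.1 e.2)
      = d.modify e.1 0 (· + e.2) := by
  by_cases h : d.contains e.1
  · simp [h]
  · rw [if_neg h, PySem.Dict.modify,
      PySem.Dict.getD_of_not_contains _ _ (by simpa using h), zero_add]

theorem getD_foldl_modify_add (l : List (String × Int)) :
    ∀ (d : PySem.Dict String Int) (k : String),
      (l.foldl (fun d e => d.modify e.1 0 (· + e.2)) d).getD k 0 = d.getD k 0 + pvTot k l := by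
  induction l with
  | nil => intro d k; simp [pvTot]
  | cons e t ih =>
      intro d k
      rw [List.foldl_cons, ih, PySem.Dict.getD_modify, pvTot_cons]
      by_cases h : k = e.1
      · subst h; rw [if_pos rfl, if_pos rfl]; ring
      · rw [if_neg h, if_neg (fun hc : e.1 = k => h hc.symm)]; ring

theorem itemsA_eq_pvL (data : List (String × Int)) :
    (data.foldl (fun final element =>
      if final.contains element.1 then final.modify element.1 0 (· + element.2)
      else final.insert element.1 element.2) PySem.Dict.empty).items = pvL data := by
  have hfold : (data.foldl (fun final element =>
      if final.contains element.1 then final.modify element.1 0 (· + element.2)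
      else final.insert element.1 element.2) PySem.Dict.empty)
      = data.foldl (fun d e => d.modify e.1 0 (· + e.2)) PySem.Dict.empty := by
    apply PySem.List.foldl_congr_mem
    intro acc x _
    exact stepA_eq_modify acc x
  rw [hfold]
  have hkeys : (data.foldl (fun d e => d.modify e.1 0 (· + e.2)) PySem.Dict.empty).keys
      = PySem.Set.ofList (data.map Prod.fst) := by
    rw [PySem.Dict.keys_foldl_modify_key data Prod.fst 0 (fun _ e v => v + e.2) PySem.Dict.empty]
    rw [PySem.Dict.keys_empty, PySem.Set.ofList_eq_foldl]
    rfl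
  have hnd : (data.foldl (fun d e => d.modify e.1 0 (· + e.2)) PySem.Dict.empty).keys.Nodup := by
    exact PySem.Dict.nodup_keys_foldl_modify_key data Prod.fst 0 (fun _ e v => v + e.2)
      PySem.Dict.empty (by simp [PySem.Dict.keys_empty])
  rw [PySem.Dict.items_eq_map_keys _ hnd 0, hkeys]
  apply List.map_congr_left
  intro k _
  rw [getD_foldl_modify_add, PySem.Dict.getD_empty, zero_add]

theorem insertBy_congr {α : Type} (f g : α → α → Bool) (x : α) :
    ∀ (acc : List α), (∀ b ∈ acc, f x b = g x b) →
      PySem.List.insertBy f x acc = PySem.List.insertBy g x acc := by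
  intro acc
  induction acc with
  | nil => intro _; rfl
  | cons y ys ih =>
      intro h
      simp only [PySem.List.insertBy, h y (by simp)]
      by_cases hg : g x y = true
      · simp [hg]
      · simp [hg, ih (fun b hb => h b (by simp [hb]))]

theorem foldl_insertBy_congr {α : Type} (f g : α → α → Bool) :
    ∀ (l acc : List α), (∀ a ∈ l, ∀ b, (b ∈ acc ∨ b ∈ l) → f a b = g a b) →
      l.foldl (fun acc x => PySem.List.insertBy f x acc) acc
        = l.foldl (fun acc x => PySem.List.insertBy g x acc) acc := by
  intro l
  induction l with
  | nil => intro acc _; rfl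
  | cons x t ih =>
      intro acc h
      rw [List.foldl_cons, List.foldl_cons,
        insertBy_congr f g x acc (fun b hb => h x (by simp) b (Or.inl hb))]
      apply ih
      intro a ha b hb
      apply h a (by simp [ha])
      rcases hb with hb | hb
      · rcases (PySem.List.mem_insertBy _ _ _ _).mp hb with rfl | hb
        · exact Or.inr (by simp)
        · exact Or.inl hb
      · exact Or.inr (by simp [hb])

theorem sorted2_eq_sorted_of_fst_inj (l : List (String × Int))
    (hinj : ∀ a ∈ l, ∀ b ∈ l, a.1 = b.1 → a = b) :
    PySem.List.sorted2 l (fun p => p.1) (fun p => p.2) false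
      = PySem.List.sorted l (fun p => p.1) false := by
  show l.foldl (fun acc x => PySem.List.insertBy _ x acc) []
      = l.foldl (fun acc x => PySem.List.insertBy _ x acc) []
  apply foldl_insertBy_congr
  intro a ha b hb
  have hb' : b ∈ l := by tauto
  by_cases h1 : a.1 < b.1
  · simp [h1]
  · by_cases h2 : b.1 < a.1
    · simp [h1, h2]
    · have : a.1 = b.1 := le_antisymm (not_lt.mp h2) (not_lt.mp h1)
      have : a = b := hinj a ha b hb' this
      subst this
      simp

-- ===== VERDICT (by name: the statement is the Claim_ definition above) =====
theorem gen_group_monthly_data_spec : Claim_equal_gen_group_monthly_data := by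
  intro data _
  show gen_group_monthly_data data = gen_group_monthly_data_alt data
  rw [alt_eq_sorted_pvL]
  show PySem.List.sorted2 (data.foldl (fun final element =>
      if final.contains element.1 then final.modify element.1 0 (· + element.2)
      else final.insert element.1 element.2) PySem.Dict.empty).items
      (fun p => p.1) (fun p => p.2) false = _
  rw [itemsA_eq_pvL]
  apply sorted2_eq_sorted_of_fst_inj
  intro a ha b hb hab
  rcases List.mem_map.mp ha with ⟨k1, _, rfl⟩
  rcases List.mem_map.mp hb with ⟨k2, _, rfl⟩
  simp only at hab
  rw [hab]
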